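-- pv_equiv track=rewrite | github.com/b1r3k/algorithms-design-and-analysis | part-one/programming-questions/006-hash-tables-and-medians/solution_two_sums.py | solution
-- ===== SOURCE A (Python) =====
-- def has_two_sum(hash_table, two_sum):
--     for integer in hash_table:
--         complementary_int = two_sum - integer
--         if hash_table.get(complementary_int, False):
--             return True
--
--     return False
--
-- def solution(uniq_integers, min_range = -10000, max_range=10000):
--     """
--     >>> solution([10000, -10000])
--     1
--
--     >>> solution([5000, 5000])
--     1
--
--     >>> solution([1, -1, 3, -3, 3], -1, 1)
--     1
--
--     >>> solution([1, -1, 3, -3, 3], -3, 3)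
--     3
--
--     """
--     sums_counter = 0
--     hash_table = {}
--
--     uniq_integers.sort()
--
--     for integer in uniq_integers:
--         hash_table[integer] = True
--
--     for two_sum in range(min_range, max_range + 1):
--         if has_two_sum(hash_table, two_sum):
--             sums_counter += 1
--
--     return sums_counter
-- ===== SOURCE B (Python) =====
-- def solution(uniq_integers, min_range=-10000, max_range=10000):
--     vals = set(uniq_integers)
--     sums = {x + y for x in vals for y in vals}
--     count = 0
--     for s in sums:
--         if min_range <= s <= max_range:
--             count += 1
--     return count
-- ===== Notes on version B (the rewrite author's own statement) =====
-- stated objective: alternative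
-- what changed: Instead of scanning every integer in [min_range, max_range] and probing a hash table for a complement, B precomputes the set of all pairwise sums of the distinct input values and counts the sums that fall in the range; this trades dependence on the range width R for dependence on N^2, and is not measurably faster on the benchmark inputs.
import Mathlib
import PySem

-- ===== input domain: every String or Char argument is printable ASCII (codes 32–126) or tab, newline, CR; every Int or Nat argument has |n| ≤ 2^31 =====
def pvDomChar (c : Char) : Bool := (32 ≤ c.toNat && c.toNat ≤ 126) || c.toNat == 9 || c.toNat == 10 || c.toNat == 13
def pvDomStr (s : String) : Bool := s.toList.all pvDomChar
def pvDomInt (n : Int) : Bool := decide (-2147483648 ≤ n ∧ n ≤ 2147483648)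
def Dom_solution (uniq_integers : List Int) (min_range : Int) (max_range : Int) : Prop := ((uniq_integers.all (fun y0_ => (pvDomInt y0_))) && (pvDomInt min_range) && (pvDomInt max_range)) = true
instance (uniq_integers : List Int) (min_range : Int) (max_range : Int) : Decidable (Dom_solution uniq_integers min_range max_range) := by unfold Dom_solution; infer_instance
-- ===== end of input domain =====

-- B replaces A's scan of every integer in the range (hash-table complement probe per integer) by a
-- different algorithm: precompute the set of all pairwise sums once and count those in range.
-- Equivalence is about the RETURN value only: A sorts uniq_integers in place, B does not mutate
-- its argument.

-- ===== PORT A =====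
def hasTwoSumLoop (d : PySem.Dict Int Bool) (two_sum : Int) : List Int → Bool
  | [] => false
  | k :: rest =>
      if d.getD (two_sum - k) false then true else hasTwoSumLoop d two_sum rest

def has_two_sum (hash_table : PySem.Dict Int Bool) (two_sum : Int) : Bool :=
  hasTwoSumLoop hash_table two_sum hash_table.keys

def solution (uniq_integers : List Int) (min_range : Int) (max_range : Int) : Int :=
  let sortedU := PySem.List.sorted uniq_integers (fun x => x) false
  let hash_table := sortedU.foldl (fun d i => d.insert i true) PySem.Dict.empty
  (PySem.List.pyRange min_range (max_range + 1) 1).foldl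
    (fun c two_sum => if has_two_sum hash_table two_sum then c + 1 else c) 0

-- ===== PORT B =====
def solution_alt (uniq_integers : List Int) (min_range : Int) (max_range : Int) : Int :=
  let vals : PySem.Set Int := PySem.Set.ofList uniq_integers
  let sums : PySem.Set Int :=
    PySem.Set.ofList (vals.flatMap (fun x => vals.map (fun y => x + y)))
  sums.foldl (fun c s => if min_range ≤ s ∧ s ≤ max_range then c + 1 else c) 0

-- ===== PRECONDITION & SPEC =====
def Spec_solution (uniq_integers : List Int) (min_range : Int) (max_range : Int) (out : Int) : Prop := out = solution_alt uniq_integers min_range max_range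
instance (uniq_integers : List Int) (min_range : Int) (max_range : Int) (out : Int) : Decidable (Spec_solution uniq_integers min_range max_range out) := by unfold Spec_solution; infer_instance

-- ===== CLAIM (what is proved, stated in full; the proofs are below) =====
def Claim_equal_solution : Prop := ∀ (uniq_integers : List Int) (min_range : Int) (max_range : Int), Dom_solution uniq_integers min_range max_range → Spec_solution uniq_integers min_range max_range (solution uniq_integers min_range max_range)

-- ===== LEMMAS AND PROOFS =====

-- the counting loop is a countP
theorem foldl_count (p : Int → Prop) [DecidablePred p] (l : List Int) (c : Int) :
    l.foldl (fun c t => if p t then c + 1 else c) c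
      = c + ((l.countP (fun t => decide (p t))) : Int) := by
  induction l generalizing c with
  | nil => simp
  | cons x xs ih =>
      simp only [List.foldl_cons, List.countP_cons, ih]
      by_cases h : p x <;> simp [h, add_assoc, add_comm]

-- membership in the dict built by the insertion loop
theorem getD_foldl_insert_true (l : List Int) (d : PySem.Dict Int Bool) (k : Int) :
    (l.foldl (fun d i => d.insert i true) d).getD k false
      = (d.getD k false || l.contains k) := by
  induction l generalizing d with
  | nil => simp
  | cons x xs ih =>
      simp only [List.foldl_cons, ih, PySem.Dict.getD_insert, List.contains_cons]
      by_cases h : k = x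
      · simp [h]
      · have hb : (k == x) = false := by simp [h]
        simp [h, hb]

theorem hasTwoSumLoop_eq_any (d : PySem.Dict Int Bool) (t : Int) (ks : List Int) :
    hasTwoSumLoop d t ks = ks.any (fun k => d.getD (t - k) false) := by
  induction ks with
  | nil => rfl
  | cons k rest ih =>
      simp only [hasTwoSumLoop, List.any_cons, ih]
      by_cases h : d.getD (t - k) false = true <;> simp [h]

theorem has_two_sum_iff (u : List Int) (t : Int) :
    has_two_sum ((PySem.List.sorted u (fun x => x) false).foldl
        (fun d i => d.insert i true) PySem.Dict.empty) t = true
      ↔ ∃ x ∈ u, ∃ y ∈ u, x + y = t := by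
  rw [has_two_sum, hasTwoSumLoop_eq_any, List.any_eq_true]
  have hkeys : ((PySem.List.sorted u (fun x => x) false).foldl
      (fun d i => d.insert i true) PySem.Dict.empty).keys
      = PySem.Set.ofList (PySem.List.sorted u (fun x => x) false) := by
    simpa using PySem.Dict.keys_foldl_insert (PySem.List.sorted u (fun x => x) false)
      (fun _ _ => true) PySem.Dict.empty
  constructor
  · rintro ⟨k, hk, hget⟩
    rw [hkeys, PySem.Set.mem_ofList, PySem.List.mem_sorted] at hk
    rw [getD_foldl_insert_true] at hget
    simp only [PySem.Dict.getD_empty, Bool.false_or, List.contains_eq_mem, decide_eq_true_eq,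
      PySem.List.mem_sorted] at hget
    exact ⟨k, hk, t - k, hget, by ring⟩
  · rintro ⟨x, hx, y, hy, hxy⟩
    refine ⟨x, ?_, ?_⟩
    · rw [hkeys, PySem.Set.mem_ofList, PySem.List.mem_sorted]; exact hx
    · rw [getD_foldl_insert_true]
      have : t - x = y := by omega
      simp [this, PySem.List.mem_sorted, hy]

-- membership in B's sums set
theorem mem_sums_iff (u : List Int) (t : Int) :
    t ∈ PySem.Set.ofList ((PySem.Set.ofList u).flatMap
        (fun x => (PySem.Set.ofList u).map (fun y => x + y)))
      ↔ ∃ x ∈ u, ∃ y ∈ u, x + y = t := by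
  simp [PySem.Set.mem_ofList, List.mem_flatMap, List.mem_map, eq_comm]

-- ===== VERDICT (by name: the statement is the Claim_ definition above) =====
theorem solution_spec : Claim_equal_solution := by
  intro u mn mx _
  show solution u mn mx = solution_alt u mn mx
  unfold solution solution_alt
  rw [foldl_count, foldl_count, zero_add, zero_add, Int.natCast_inj]
  rw [List.countP_eq_length_filter, List.countP_eq_length_filter]
  apply List.Perm.length_eq
  rw [List.perm_ext_iff_of_nodup
    (List.Nodup.filter _ (PySem.List.nodup_pyRange_one mn (mx + 1)))
    (List.Nodup.filter _ (PySem.Set.nodup_ofList _))]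
  intro t
  simp only [List.mem_filter, PySem.List.mem_pyRange_one, decide_eq_true_eq]
  rw [has_two_sum_iff, mem_sums_iff]
  constructor
  · rintro ⟨⟨h1, h2⟩, h3⟩
    exact ⟨h3, by omega⟩
  · rintro ⟨h1, h2⟩
    exact ⟨⟨by omega, by omega⟩, h1⟩
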